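-- pv_equiv track=rewrite | github.com/hliu45/algorithm_related | csvReader.py | developer_vs_id
-- ===== SOURCE A (Python) =====
-- def developer_vs_id(bug_list):
-- 	diction_who_vs_id={}
-- 	for every in bug_list[1:]:
-- 		if every[3] not in diction_who_vs_id.keys():
-- 			diction_who_vs_id[every[3]]=[every[0]]
-- 		else:
-- 			diction_who_vs_id[every[3]].append(every[0])
-- 	del diction_who_vs_id['nobody']
-- 	return diction_who_vs_id
-- ===== SOURCE B (Python) =====
-- def developer_vs_id(bug_list):
--     rows = bug_list[1:]
--     devs = []
--     for row in rows:
--         d = row[3]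
--         if d != 'nobody' and d not in devs:
--             devs.append(d)
--     return {d: [row[0] for row in rows if row[3] == d] for d in devs}
-- ===== Notes on version B (the rewrite author's own statement) =====
-- stated objective: alternative
-- what changed: B replaces A's incremental dict accumulation followed by del with a two-pass scheme: first collect the distinct developers in first-occurrence order while skipping 'nobody', then build each group by a per-developer filter over the rows, so no dict is mutated and no key is deleted.
import Mathlib
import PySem

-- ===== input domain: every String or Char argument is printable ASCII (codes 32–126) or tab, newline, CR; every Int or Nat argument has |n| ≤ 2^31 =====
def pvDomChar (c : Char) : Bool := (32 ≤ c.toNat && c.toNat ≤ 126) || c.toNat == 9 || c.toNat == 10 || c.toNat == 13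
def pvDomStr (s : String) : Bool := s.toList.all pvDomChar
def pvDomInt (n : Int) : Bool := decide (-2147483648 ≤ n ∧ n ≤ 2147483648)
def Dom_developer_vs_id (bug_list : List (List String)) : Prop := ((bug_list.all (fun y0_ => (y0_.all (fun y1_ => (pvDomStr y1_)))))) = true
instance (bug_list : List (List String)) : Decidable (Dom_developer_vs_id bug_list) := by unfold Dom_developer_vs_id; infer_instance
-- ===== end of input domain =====

-- B replaces A's incremental dict accumulation + del with a two-pass scheme (distinct
-- developers except 'nobody' in first-occurrence order, then a per-developer filter);
-- the equivalence is about the RETURN value (neither program mutates its argument).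

-- ===== PORT A =====
-- one loop iteration: if every[3] not in dict's keys, insert [every[0]], else append every[0]
def developerStepA (d : PySem.Dict String (List String)) (every : List String) :
    PySem.Dict String (List String) :=
  if d.contains (PySem.List.pyGetD every 3 "") = false then
    d.insert (PySem.List.pyGetD every 3 "") [PySem.List.pyGetD every 0 ""]
  else
    d.modify (PySem.List.pyGetD every 3 "") [] (fun l => l ++ [PySem.List.pyGetD every 0 ""])

def developer_vs_id (bug_list : List (List String)) : List (String × List String) :=
  let diction := (PySem.List.slice bug_list (some 1) none).foldl developerStepA PySem.Dict.empty
  (diction.erase "nobody").items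

-- ===== PORT B =====
-- first pass: distinct developers in first-occurrence order, skipping 'nobody'
def developerDevsB (rows : List (List String)) : List String :=
  rows.foldl
    (fun devs row =>
      if PySem.List.pyGetD row 3 "" ≠ "nobody" ∧ PySem.List.pyGetD row 3 "" ∉ devs then
        devs ++ [PySem.List.pyGetD row 3 ""]
      else devs)
    []

def developer_vs_id_alt (bug_list : List (List String)) : List (String × List String) :=
  let rows := PySem.List.slice bug_list (some 1) none
  (developerDevsB rows).map
    (fun d => (d, (rows.filter (fun row => PySem.List.pyGetD row 3 "" == d)).map
                    (fun row => PySem.List.pyGetD row 0 "")))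

-- ===== PRECONDITION & SPEC =====
-- Pre_ excludes exactly the inputs where the Python A raises: a data row with fewer than
-- 4 fields (IndexError on every[3]/every[0]) or no data row assigned to 'nobody'
-- (KeyError on del diction_who_vs_id['nobody']).
def Pre_developer_vs_id (bug_list : List (List String)) : Prop :=
  (∀ r ∈ bug_list.drop 1, 4 ≤ r.length) ∧
  ("nobody" ∈ (bug_list.drop 1).map (fun r => r.getD 3 ""))
instance (bug_list : List (List String)) : Decidable (Pre_developer_vs_id bug_list) := by
  unfold Pre_developer_vs_id; infer_instance

def pvWitness_developer_vs_id : List (List String) :=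
  [["id", "s", "c", "who"], ["1", "x", "y", "bob"], ["2", "x", "y", "nobody"], ["3", "x", "y", "bob"]]

def Spec_developer_vs_id (bug_list : List (List String)) (out : List (String × List String)) : Prop := out = developer_vs_id_alt bug_list
instance (bug_list : List (List String)) (out : List (String × List String)) : Decidable (Spec_developer_vs_id bug_list out) := by unfold Spec_developer_vs_id; infer_instance

-- ===== CLAIM (what is proved, stated in full; the proofs are below) =====
def Claim_equal_developer_vs_id : Prop := ∀ (bug_list : List (List String)), Dom_developer_vs_id bug_list → Pre_developer_vs_id bug_list → Spec_developer_vs_id bug_list (developer_vs_id bug_list)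

-- ===== LEMMAS AND PROOFS =====

-- abbreviations for the two fields every row contributes
def rowKey (r : List String) : String := PySem.List.pyGetD r 3 ""
def rowVal (r : List String) : String := PySem.List.pyGetD r 0 ""

-- the group B computes for a developer d
def grp (rows : List (List String)) (d : String) : List String :=
  (rows.filter (fun row => rowKey row == d)).map rowVal

-- A's branching step is exactly a modify
theorem developerStepA_eq_modify (d : PySem.Dict String (List String)) (r : List String) :
    developerStepA d r = d.modify (rowKey r) [] (fun l => l ++ [rowVal r]) := by
  unfold developerStepA PySem.Dict.modify rowKey rowVal
  by_cases h : d.contains (PySem.List.pyGetD r 3 "") = true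
  · simp [h]
  · simp only [Bool.not_eq_true] at h
    simp [h, PySem.Dict.getD_of_not_contains _ [] h]

-- characterisation of A's dict after the loop
theorem foldA_getD (rows : List (List String)) (c : String) :
    (rows.foldl developerStepA PySem.Dict.empty).getD c [] = grp rows c := by
  have h1 : rows.foldl developerStepA PySem.Dict.empty
      = (rows.map (fun r => (rowKey r, rowVal r))).foldl
          (fun d p => d.modify p.1 [] (fun l => l ++ [p.2])) PySem.Dict.empty := by
    rw [List.foldl_map]
    exact PySem.List.foldl_congr_mem rows _ _ _
      (by intro d r _; exact developerStepA_eq_modify d r)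
  rw [h1, PySem.Dict.getD_foldl_modify_append, PySem.Dict.getD_empty, List.filter_map,
    List.map_map]
  simp [grp, Function.comp_def]

theorem foldA_keys (rows : List (List String)) :
    (rows.foldl developerStepA PySem.Dict.empty).keys
      = PySem.Set.ofList (rows.map rowKey) := by
  have h1 : rows.foldl developerStepA PySem.Dict.empty
      = rows.foldl (fun d r => d.modify (rowKey r) [] (fun l => l ++ [rowVal r]))
          PySem.Dict.empty :=
    PySem.List.foldl_congr_mem rows _ _ _ (by intro d r _; exact developerStepA_eq_modify d r)
  rw [h1, PySem.Dict.keys_foldl_modify_key rows rowKey [] (fun d r l => l ++ [rowVal r])]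
  simp [PySem.Set.ofList, PySem.Set.update, PySem.Dict.keys_empty, PySem.Set.empty]

theorem foldA_nodup (rows : List (List String)) :
    (rows.foldl developerStepA PySem.Dict.empty).keys.Nodup := by
  have h1 : rows.foldl developerStepA PySem.Dict.empty
      = rows.foldl (fun d r => d.modify (rowKey r) [] (fun l => l ++ [rowVal r]))
          PySem.Dict.empty :=
    PySem.List.foldl_congr_mem rows _ _ _ (by intro d r _; exact developerStepA_eq_modify d r)
  rw [h1]
  exact PySem.Dict.nodup_keys_foldl_modify_key rows rowKey [] (fun d r l => l ++ [rowVal r])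
    PySem.Dict.empty (by simp [PySem.Dict.keys_empty])

-- B's first pass computes the non-'nobody' elements of the ordered dedup of the keys
theorem devsB_eq_filter_aux (rows : List (List String)) (s : PySem.Set String) :
    rows.foldl
      (fun devs row =>
        if PySem.List.pyGetD row 3 "" ≠ "nobody" ∧ PySem.List.pyGetD row 3 "" ∉ devs then
          devs ++ [PySem.List.pyGetD row 3 ""]
        else devs)
      (s.filter (fun k => !(k == "nobody")))
    = (PySem.Set.update s (rows.map rowKey)).filter (fun k => !(k == "nobody")) := by
  induction rows generalizing s with
  | nil => simp [PySem.Set.update]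
  | cons r rows ih =>
    have hstep :
        (if PySem.List.pyGetD r 3 "" ≠ "nobody" ∧
            PySem.List.pyGetD r 3 "" ∉ s.filter (fun k => !(k == "nobody")) then
          s.filter (fun k => !(k == "nobody")) ++ [PySem.List.pyGetD r 3 ""]
        else s.filter (fun k => !(k == "nobody")))
        = (PySem.Set.add s (rowKey r)).filter (fun k => !(k == "nobody")) := by
      unfold PySem.Set.add rowKey
      by_cases hk : PySem.List.pyGetD r 3 "" = "nobody"
      · by_cases hm : "nobody" ∈ s <;> simp [hk, hm, List.filter_append]
      · have hmem : PySem.List.pyGetD r 3 "" ∈ s.filter (fun k => !(k == "nobody"))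
            ↔ PySem.List.pyGetD r 3 "" ∈ s := by
          simp [List.mem_filter, hk]
        by_cases hc : PySem.List.pyGetD r 3 "" ∈ s
        · simp [hk, hmem, hc]
        · simp [hk, hmem, hc, List.filter_append]
    simp only [List.foldl_cons, List.map_cons, hstep]
    rw [ih (PySem.Set.add s (rowKey r))]
    rfl

theorem devsB_eq_filter (rows : List (List String)) :
    developerDevsB rows
      = (PySem.Set.ofList (rows.map rowKey)).filter (fun k => !(k == "nobody")) := by
  have := devsB_eq_filter_aux rows PySem.Set.empty
  simpa [developerDevsB, PySem.Set.empty, PySem.Set.ofList, PySem.Set.update] using this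

-- the main equality, for every input (Pre_ is only about where the Python A returns)
theorem main_eq (rows : List (List String)) :
    ((rows.foldl developerStepA PySem.Dict.empty).erase "nobody").items
      = (developerDevsB rows).map
          (fun d => (d, (rows.filter (fun row => PySem.List.pyGetD row 3 "" == d)).map
                    (fun row => PySem.List.pyGetD row 0 ""))) := by
  have herase : ∀ (d : PySem.Dict String (List String)),
      (d.erase "nobody").items = d.items.filter (fun p => !(p.1 == "nobody")) := by
    intro d; rfl
  rw [herase,
    PySem.Dict.items_eq_map_keys (rows.foldl developerStepA PySem.Dict.empty)
      (foldA_nodup rows) [],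
    foldA_keys, List.filter_map, devsB_eq_filter]
  refine List.map_congr_left ?_
  intro k _
  simp [foldA_getD, grp, rowKey, rowVal]

theorem developer_vs_id_eq_alt (bug_list : List (List String)) :
    developer_vs_id bug_list = developer_vs_id_alt bug_list := by
  simp only [developer_vs_id, developer_vs_id_alt]
  exact main_eq _

-- ===== VERDICT (by name: the statement is the Claim_ definition above) =====
theorem developer_vs_id_spec : Claim_equal_developer_vs_id := by
  intro bug_list _ _
  unfold Spec_developer_vs_id
  exact developer_vs_id_eq_alt bug_list
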